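-- pv_equiv track=rewrite | github.com/6112/project-euler | modules/sequence.py | take_n
-- ===== SOURCE A (Python) =====
-- def take_n(tokens, n):
--     """Used as an iterator for all possible combinations of n elements from
--     tokens."""
--     if not tokens:
--         yield []
--         return
--     if n == 0:
--         yield []
--         return
--     encountered = set()
--     for index, first in enumerate(tokens):
--         if first not in encountered:
--             rest = tokens[index + 1 :]
--             encountered.add(first)
--             if n == 1:
--                 yield [first]
--             else:
--                 for perm in take_n(rest, n - 1):
--                     if perm:
--                         yield [first] + perm
-- ===== SOURCE B (Python) =====
-- from itertools import combinations
--
--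
-- def take_n(tokens, n):
--     """Used as an iterator for all possible combinations of n elements from
--     tokens."""
--     if not tokens:
--         yield []
--         return
--     if n < 0 or n > len(tokens):
--         return
--     seen = set()
--     for combo in combinations(tokens, n):
--         if combo not in seen:
--             seen.add(combo)
--             yield list(combo)
-- ===== Notes on version B (the rewrite author's own statement) =====
-- stated objective: idiomatic
-- what changed: Replaced the pruned recursive generator with itertools.combinations plus a seen-set that drops duplicate tuples, keeping the same index-lexicographic order and guards for empty tokens and negative n.
import Mathlib
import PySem

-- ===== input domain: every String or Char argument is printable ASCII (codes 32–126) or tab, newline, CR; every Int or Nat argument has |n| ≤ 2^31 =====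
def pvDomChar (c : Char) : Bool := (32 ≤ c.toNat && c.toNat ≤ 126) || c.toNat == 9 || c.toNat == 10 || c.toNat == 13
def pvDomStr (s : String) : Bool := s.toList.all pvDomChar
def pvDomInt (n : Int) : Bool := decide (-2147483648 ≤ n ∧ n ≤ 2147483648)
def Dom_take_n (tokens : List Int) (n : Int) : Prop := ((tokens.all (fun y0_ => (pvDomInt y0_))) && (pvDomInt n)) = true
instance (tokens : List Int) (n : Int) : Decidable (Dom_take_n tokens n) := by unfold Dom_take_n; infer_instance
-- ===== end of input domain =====

-- B replaces A's pruned recursive dedup generator by a library-style combinations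
-- enumerator followed by a seen-set filter (same outputs, same order); objective: idiomatic.

-- ===== PORT A =====
-- A's generator, materialised as the list of its yields; the `for index, first in
-- enumerate(tokens)` loop with `rest = tokens[index+1:]` is the structural recursion
-- takeLoopA over the list (rest IS the tail at each position).
mutual
def take_n (tokens : List Int) (n : Int) : List (List Int) :=
  if tokens = [] then [[]]
  else if n = 0 then [[]]
  else takeLoopA n tokens PySem.Set.empty
termination_by (2 * tokens.length + 1, 0)

def takeLoopA (n : Int) (ts : List Int) (enc : PySem.Set Int) : List (List Int) :=
  match ts with
  | [] => []
  | first :: rest =>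
    if PySem.Set.contains enc first then
      takeLoopA n rest enc
    else
      (if n = 1 then [[first]]
       else ((take_n rest (n - 1)).filter (fun perm => perm ≠ [])).map
              (fun perm => first :: perm))
      ++ takeLoopA n rest (PySem.Set.add enc first)
termination_by (2 * ts.length, 1)
end

-- ===== PORT B =====
-- port of itertools.combinations(tokens, k) (index-lexicographic order, tuples as lists)
def combosB (k : Nat) (l : List Int) : List (List Int) :=
  match k, l with
  | 0, _ => [[]]
  | _ + 1, [] => []
  | k + 1, x :: xs => (combosB k xs).map (fun c => x :: c) ++ combosB (k + 1) xs

-- B's `for combo in combinations(...): if combo not in seen: seen.add(combo); yield list(combo)`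
def dedupLoopB (seen : PySem.Set (List Int)) (cs : List (List Int)) : List (List Int) :=
  match cs with
  | [] => []
  | c :: rest =>
    if PySem.Set.contains seen c then dedupLoopB seen rest
    else c :: dedupLoopB (PySem.Set.add seen c) rest

def take_n_alt (tokens : List Int) (n : Int) : List (List Int) :=
  if tokens = [] then [[]]
  else if n < 0 ∨ (tokens.length : Int) < n then []
  else dedupLoopB PySem.Set.empty (combosB n.toNat tokens)

-- ===== PRECONDITION & SPEC =====
def Spec_take_n (tokens : List Int) (n : Int) (out : List (List Int)) : Prop := out = take_n_alt tokens n
instance (tokens : List Int) (n : Int) (out : List (List Int)) : Decidable (Spec_take_n tokens n out) := by unfold Spec_take_n; infer_instance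

-- ===== CLAIM (what is proved, stated in full; the proofs are below) =====
def Claim_equal_take_n : Prop := ∀ (tokens : List Int) (n : Int), Dom_take_n tokens n → Spec_take_n tokens n (take_n tokens n)

-- ===== LEMMAS AND PROOFS =====

-- cons-step rewrites for the two loops (discharging the Bool `contains` test)
theorem dedupLoopB_cons_mem {S : PySem.Set (List Int)} {c : List Int}
    {rest : List (List Int)} (hc : c ∈ S) :
    dedupLoopB S (c :: rest) = dedupLoopB S rest := by
  simp [dedupLoopB, hc]

theorem dedupLoopB_cons_not_mem {S : PySem.Set (List Int)} {c : List Int}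
    {rest : List (List Int)} (hc : c ∉ S) :
    dedupLoopB S (c :: rest) = c :: dedupLoopB (PySem.Set.add S c) rest := by
  simp [dedupLoopB, hc]

theorem takeLoopA_cons_mem {n : Int} {E : PySem.Set Int} {v : Int} {rest : List Int}
    (hv : v ∈ E) : takeLoopA n (v :: rest) E = takeLoopA n rest E := by
  simp [takeLoopA, hv]

theorem takeLoopA_cons_not_mem {n : Int} {E : PySem.Set Int} {v : Int} {rest : List Int}
    (hv : v ∉ E) :
    takeLoopA n (v :: rest) E =
      (if n = 1 then [[v]]
       else ((take_n rest (n - 1)).filter (fun perm => perm ≠ [])).map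
              (fun perm => v :: perm))
      ++ takeLoopA n rest (PySem.Set.add E v) := by
  simp [takeLoopA, hv]

-- membership in the B dedup loop's output
theorem mem_dedupLoopB (S : PySem.Set (List Int)) (cs : List (List Int)) (x : List Int) :
    x ∈ dedupLoopB S cs ↔ x ∈ cs ∧ x ∉ S := by
  induction cs generalizing S with
  | nil => simp [dedupLoopB]
  | cons c rest ih =>
    by_cases hc : c ∈ S
    · simp only [dedupLoopB_cons_mem hc, ih, List.mem_cons]
      constructor
      · rintro ⟨h1, h2⟩; exact ⟨Or.inr h1, h2⟩
      · rintro ⟨h1 | h1, h2⟩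
        · subst h1; exact absurd hc h2
        · exact ⟨h1, h2⟩
    · simp only [dedupLoopB_cons_not_mem hc, List.mem_cons, ih, PySem.Set.mem_add]
      constructor
      · rintro (h | ⟨h1, h2⟩)
        · exact ⟨Or.inl h, h ▸ hc⟩
        · exact ⟨Or.inr h1, fun hs => h2 (Or.inl hs)⟩
      · rintro ⟨h1 | h1, h2⟩
        · exact Or.inl h1
        · by_cases hx : x = c
          · exact Or.inl hx
          · exact Or.inr ⟨h1, by rintro (h | h); exact h2 h; exact hx h⟩

-- every element of the input already seen ⇒ the loop emits nothing
theorem dedupLoopB_nil_of_subset (S : PySem.Set (List Int)) (cs : List (List Int))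
    (h : ∀ x ∈ cs, x ∈ S) : dedupLoopB S cs = [] := by
  induction cs with
  | nil => rfl
  | cons c rest ih =>
    rw [dedupLoopB_cons_mem (h c List.mem_cons_self)]
    exact ih fun x hx => h x (List.mem_cons_of_mem _ hx)

theorem foldl_add_of_subset (S : PySem.Set (List Int)) (cs : List (List Int))
    (h : ∀ x ∈ cs, x ∈ S) : cs.foldl PySem.Set.add S = S := by
  induction cs generalizing S with
  | nil => rfl
  | cons c rest ih =>
    simp only [List.foldl_cons, PySem.Set.add_of_mem (h c List.mem_cons_self)]
    exact ih S fun x hx => h x (List.mem_cons_of_mem _ hx)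

theorem mem_foldl_add (S : PySem.Set (List Int)) (cs : List (List Int)) (x : List Int) :
    x ∈ cs.foldl PySem.Set.add S ↔ x ∈ S ∨ x ∈ cs := by
  induction cs generalizing S with
  | nil => simp
  | cons c rest ih =>
    simp only [List.foldl_cons, ih, PySem.Set.mem_add, List.mem_cons]
    tauto

-- the dedup loop over an append splits, the seen set advancing by Set.add over the first part
theorem dedupLoopB_append (S : PySem.Set (List Int)) (xs ys : List (List Int)) :
    dedupLoopB S (xs ++ ys) =
      dedupLoopB S xs ++ dedupLoopB (xs.foldl PySem.Set.add S) ys := by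
  induction xs generalizing S with
  | nil => rfl
  | cons c rest ih =>
    by_cases hc : c ∈ S
    · simp only [List.cons_append, dedupLoopB_cons_mem hc, List.foldl_cons,
        PySem.Set.add_of_mem hc, ih]
    · simp only [List.cons_append, dedupLoopB_cons_not_mem hc, List.foldl_cons, ih,
        List.cons_append]

-- dedup of a (v :: ·)-mapped list is the map of the dedup, tail seen-sets corresponding
theorem dedupLoopB_map_cons (v : Int) (L : List (List Int))
    (S : PySem.Set (List Int)) (T : PySem.Set (List Int))
    (h : ∀ c ∈ L, ((v :: c) ∈ S ↔ c ∈ T)) :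
    dedupLoopB S (L.map (fun c => v :: c)) = (dedupLoopB T L).map (fun c => v :: c) := by
  induction L generalizing S T with
  | nil => rfl
  | cons c rest ih =>
    have hiff := h c List.mem_cons_self
    by_cases hc : c ∈ T
    · rw [List.map_cons, dedupLoopB_cons_mem (hiff.mpr hc), dedupLoopB_cons_mem hc]
      exact ih S T fun x hx => h x (List.mem_cons_of_mem _ hx)
    · have h1 : (v :: c) ∉ S := fun hs => hc (hiff.mp hs)
      rw [List.map_cons, dedupLoopB_cons_not_mem h1, dedupLoopB_cons_not_mem hc,
        List.map_cons]
      congr 1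
      exact ih _ _ fun x hx => by
        simp only [PySem.Set.mem_add, h x (List.mem_cons_of_mem _ hx), List.cons.injEq]
        tauto

-- combosB k l enumerates exactly the length-k sublists of l
theorem mem_combosB (k : Nat) (l : List Int) (c : List Int) :
    c ∈ combosB k l ↔ c.Sublist l ∧ c.length = k := by
  induction l generalizing k c with
  | nil =>
    cases k with
    | zero => simp [combosB, List.length_eq_zero_iff]
    | succ k =>
      simp only [combosB, List.not_mem_nil, false_iff, not_and]
      intro hs
      simp [List.sublist_nil.mp hs]
  | cons x xs ih =>
    cases k with
    | zero =>
      simp only [combosB, List.mem_singleton, List.length_eq_zero_iff]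
      constructor
      · rintro rfl; exact ⟨List.nil_sublist _, rfl⟩
      · rintro ⟨_, rfl⟩; rfl
    | succ k =>
      simp only [combosB, List.mem_append, List.mem_map, ih, List.sublist_cons_iff]
      constructor
      · rintro (⟨c', ⟨hs, hl⟩, rfl⟩ | ⟨hs, hl⟩)
        · exact ⟨Or.inr ⟨c', rfl, hs⟩, by simp [hl]⟩
        · exact ⟨Or.inl hs, hl⟩
      · rintro ⟨hs | ⟨r, rfl, hr⟩, hl⟩
        · exact Or.inr ⟨hs, hl⟩
        · exact Or.inl ⟨r, ⟨hr, by simpa using hl⟩, rfl⟩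

-- the invariant tying A's per-level value set to B's global tuple set:
-- among length-k sublists of the remaining tokens, "tuple already emitted by B"
-- coincides with "head value already encountered by A"
def InvTN (k : Nat) (E : PySem.Set Int) (S : PySem.Set (List Int)) (t : List Int) : Prop :=
  ∀ (h : Int) (tl : List Int), (h :: tl).Sublist t → tl.length + 1 = k →
    ((h :: tl) ∈ S ↔ h ∈ E)

theorem takeLoopA_neg (t : List Int) (n : Int) (hn : n < 0) (E : PySem.Set Int) :
    takeLoopA n t E = [] := by
  induction t generalizing n E with
  | nil => rw [takeLoopA]
  | cons v rest ih =>
    have hn1 : n ≠ 1 := by omega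
    have hrec : ((take_n rest (n - 1)).filter (fun perm => perm ≠ [])) = [] := by
      rcases eq_or_ne rest [] with h | h
      · subst h; simp [take_n]
      · have : take_n rest (n - 1) = takeLoopA (n - 1) rest PySem.Set.empty := by
          rw [take_n]; simp [h, show n - 1 ≠ 0 by omega]
        rw [this, ih (n - 1) (by omega)]
        rfl
    by_cases hc : v ∈ E
    · rw [takeLoopA_cons_mem hc]; exact ih n hn E
    · rw [takeLoopA_cons_not_mem hc, if_neg hn1, hrec]
      simp [ih n hn]

-- the central lemma: A's loop = B's dedup of the combinations of the remaining tokens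
theorem takeLoopA_eq_dedup (k' : Nat) :
    ∀ (t : List Int) (E : PySem.Set Int) (S : PySem.Set (List Int)),
      InvTN (k' + 1) E S t →
      takeLoopA ((k' : Int) + 1) t E = dedupLoopB S (combosB (k' + 1) t) := by
  induction k' with
  | zero =>
    intro t
    induction t with
    | nil => intro E S _; rw [takeLoopA]; rfl
    | cons v rest ih =>
      intro E S hinv
      have hinv' : InvTN 1 E S rest := fun h tl hs hl =>
        hinv h tl (hs.trans (List.sublist_cons_self v rest)) hl
      rw [show combosB 1 (v :: rest) =
            (combosB 0 rest).map (fun c => v :: c) ++ combosB 1 rest from rfl]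
      rw [dedupLoopB_append]
      by_cases hv : v ∈ E
      · have hall : ∀ x ∈ (combosB 0 rest).map (fun c => v :: c), x ∈ S := by
          rintro x hx
          simp only [combosB, List.map_cons, List.map_nil, List.mem_singleton] at hx
          subst hx
          exact (hinv v [] (by simp [List.cons_sublist_cons, List.nil_sublist]) rfl).mpr hv
        rw [dedupLoopB_nil_of_subset _ _ hall, foldl_add_of_subset _ _ hall]
        simp only [List.nil_append]
        rw [takeLoopA_cons_mem hv]
        exact ih E S hinv'
      · have hnotin : [v] ∉ S := fun hs =>
          hv ((hinv v [] (by simp [List.cons_sublist_cons, List.nil_sublist]) rfl).mp hs)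
        rw [takeLoopA_cons_not_mem hv, if_pos (by norm_num : ((0 : Nat) : Int) + 1 = 1)]
        have hfront : dedupLoopB S ((combosB 0 rest).map (fun c => v :: c)) = [[v]] := by
          simp [combosB, dedupLoopB_cons_not_mem hnotin, dedupLoopB]
        rw [hfront]
        congr 1
        have hS' : ((combosB 0 rest).map (fun c => v :: c)).foldl PySem.Set.add S
            = PySem.Set.add S [v] := by simp [combosB]
        rw [hS']
        refine ih (PySem.Set.add E v) (PySem.Set.add S [v]) ?_
        intro h tl hs hl
        have hlen : tl = [] := by
          cases tl
          · rfl
          · simp at hl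
        subst hlen
        simp only [PySem.Set.mem_add, PySem.Set.mem_add]
        constructor
        · rintro (hmem | hmem)
          · exact Or.inl ((hinv h [] (hs.trans (List.sublist_cons_self v rest)) rfl).mp hmem)
          · exact Or.inr (by injection hmem)
        · rintro (hmem | rfl)
          · exact Or.inl ((hinv h [] (hs.trans (List.sublist_cons_self v rest)) rfl).mpr hmem)
          · exact Or.inr rfl
  | succ k'' ihk =>
    intro t
    induction t with
    | nil => intro E S _; rw [takeLoopA]; rfl
    | cons v rest ih =>
      intro E S hinv
      have hinv' : InvTN (k'' + 1 + 1) E S rest := fun h tl hs hl =>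
        hinv h tl (hs.trans (List.sublist_cons_self v rest)) hl
      rw [show combosB (k'' + 1 + 1) (v :: rest) =
            (combosB (k'' + 1) rest).map (fun c => v :: c) ++ combosB (k'' + 1 + 1) rest
          from rfl]
      rw [dedupLoopB_append]
      by_cases hv : v ∈ E
      · have hall : ∀ x ∈ (combosB (k'' + 1) rest).map (fun c => v :: c), x ∈ S := by
          rintro x hx
          obtain ⟨c, hc, rfl⟩ := List.mem_map.mp hx
          obtain ⟨hsub, hlen⟩ := (mem_combosB _ _ _).mp hc
          exact (hinv v c (List.cons_sublist_cons.mpr hsub) (by omega)).mpr hv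
        rw [dedupLoopB_nil_of_subset _ _ hall, foldl_add_of_subset _ _ hall]
        simp only [List.nil_append]
        rw [takeLoopA_cons_mem hv]
        exact ih E S hinv'
      · have hn1 : ((k'' : Int) + 1) + 1 ≠ 1 := by omega
        -- the group emitted for head v equals the dedup of the v-headed combinations
        have hgroup :
            ((take_n rest (((k'' : Int) + 1 + 1) - 1)).filter (fun perm => perm ≠ [])).map
              (fun perm => v :: perm)
            = dedupLoopB S ((combosB (k'' + 1) rest).map (fun c => v :: c)) := by
          have harg : ((k'' : Int) + 1 + 1) - 1 = (k'' : Int) + 1 := by ring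
          rw [harg]
          have hmap := dedupLoopB_map_cons v (combosB (k'' + 1) rest) S PySem.Set.empty
            (fun c hc => by
              obtain ⟨hsub, hlen⟩ := (mem_combosB _ _ _).mp hc
              simp only [PySem.Set.empty, List.not_mem_nil, iff_false]
              intro hs
              exact hv ((hinv v c (List.cons_sublist_cons.mpr hsub) (by omega)).mp hs))
          rw [hmap]
          congr 1
          rcases eq_or_ne rest [] with hr | hr
          · subst hr
            have : combosB (k'' + 1) ([] : List Int) = [] := rfl
            simp [take_n, this, dedupLoopB]
          · have : take_n rest ((k'' : Int) + 1)
                = takeLoopA ((k'' : Int) + 1) rest PySem.Set.empty := by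
              rw [take_n]; simp [hr, show (k'' : Int) + 1 ≠ 0 by omega]
            rw [this, ihk rest PySem.Set.empty PySem.Set.empty
              (fun h tl _ _ => by simp [PySem.Set.empty])]
            apply List.filter_eq_self.mpr
            intro a ha
            obtain ⟨hsub, hlen⟩ :=
              (mem_combosB _ _ _).mp ((mem_dedupLoopB _ _ _).mp ha).1
            simp only [ne_eq, decide_eq_true_eq]
            intro hnil
            subst hnil
            simp at hlen
        push_cast at ih ⊢
        rw [takeLoopA_cons_not_mem hv, if_neg hn1, hgroup]
        congr 1
        refine ih (PySem.Set.add E v)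
          (((combosB (k'' + 1) rest).map (fun c => v :: c)).foldl PySem.Set.add S) ?_
        intro h tl hs hl
        rw [mem_foldl_add, PySem.Set.mem_add]
        constructor
        · rintro (hmem | hmem)
          · exact Or.inl ((hinv h tl (hs.trans (List.sublist_cons_self v rest)) hl).mp hmem)
          · obtain ⟨c, _, heq⟩ := List.mem_map.mp hmem
            injection heq.symm with h1 _
            exact Or.inr h1
        · rintro (hmem | rfl)
          · exact Or.inl ((hinv h tl (hs.trans (List.sublist_cons_self v rest)) hl).mpr hmem)
          · refine Or.inr (List.mem_map.mpr ⟨tl, ?_, rfl⟩)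
            refine (mem_combosB _ _ _).mpr ⟨?_, by omega⟩
            exact (List.sublist_cons_self h tl).trans hs

theorem combosB_eq_nil_of_lt (k : Nat) (l : List Int) (h : l.length < k) :
    combosB k l = [] := by
  rw [List.eq_nil_iff_forall_not_mem]
  intro c hc
  obtain ⟨hs, hl⟩ := (mem_combosB _ _ _).mp hc
  have := hs.length_le
  omega

-- ===== VERDICT (by name: the statement is the Claim_ definition above) =====
theorem take_n_spec : Claim_equal_take_n := by
  intro tokens n _
  unfold Spec_take_n
  rcases eq_or_ne tokens [] with h | h
  · subst h; rw [take_n, take_n_alt]; rfl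
  · rcases lt_trichotomy n 0 with hn | hn | hn
    · rw [take_n, take_n_alt]
      simp only [h, if_pos (Or.inl hn), show n ≠ 0 by omega, if_false]
      exact takeLoopA_neg tokens n hn PySem.Set.empty
    · subst hn
      rw [take_n, take_n_alt]
      simp only [if_neg h, show ¬((0 : Int) < 0 ∨ (tokens.length : Int) < 0) by omega,
        if_false]
      have : (0 : Int).toNat = 0 := rfl
      rw [this]
      induction tokens with
      | nil => rfl
      | cons v rest _ => rfl
    · obtain ⟨k', hk⟩ : ∃ k' : Nat, n = (k' : Int) + 1 := ⟨(n - 1).toNat, by omega⟩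
      subst hk
      rw [take_n, take_n_alt]
      have hmain := takeLoopA_eq_dedup k' tokens PySem.Set.empty PySem.Set.empty
        (fun h tl _ _ => by simp [PySem.Set.empty])
      by_cases hbig : (tokens.length : Int) < (k' : Int) + 1
      · simp only [if_neg h, if_pos (Or.inr hbig), show (k' : Int) + 1 ≠ 0 by omega,
          if_false]
        rw [hmain, combosB_eq_nil_of_lt (k' + 1) tokens (by omega)]
        rfl
      · simp only [if_neg h,
          show ¬(((k' : Int) + 1 < 0) ∨ (tokens.length : Int) < (k' : Int) + 1) by omega,
          if_false, show (k' : Int) + 1 ≠ 0 by omega]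
        have htn : ((k' : Int) + 1).toNat = k' + 1 := by omega
        rw [htn]
        exact hmain
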